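-- pv_equiv track=rewrite | github.com/Nanjiifr/mpi_screeps | gen_carte.py | mirror_map
-- ===== SOURCE A (Python) =====
-- def make_empty_map(w, h, fill=0):
--     return [[fill for _ in range(w)] for __ in range(h)]
--
-- def mirror_map(m, nb_players):
--     # returns a new full-size map mirrored according to nb_players
--     h = len(m); w = len(m[0])
--     # if m already full-size (we assume it's full-size), we'll apply mirroring on quadrants
--     # We assume input m is full-size but only a seed quadrant may have been written; nevertheless
--     # We'll produce full map by mirroring quadrants based on central axes.
--     full = make_empty_map(w,h,0)
--     for y in range(h):
--         for x in range(w):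
--             full[y][x] = m[y][x]
--     # if nb_players == 2 -> vertical mirror (left-right)
--     if nb_players == 2:
--         for y in range(h):
--             for x in range(w//2):
--                 left = full[y][x]
--                 right_x = w-1-x
--                 full[y][right_x] = left
--     elif nb_players == 4:
--         # mirror left-right then top-bottom to create 4-quadrant symmetry
--         for y in range(h):
--             for x in range(w//2):
--                 full[y][w-1-x] = full[y][x]
--         for y in range(h//2):
--             for x in range(w):
--                 full[h-1-y][x] = full[y][x]
--     elif nb_players == 8:
--         # create 4-fold as above then additionally mirror across main diagonal-ish by copying transpose blocks when square
--         for y in range(h):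
--             for x in range(w//2):
--                 full[y][w-1-x] = full[y][x]
--         for y in range(h//2):
--             for x in range(w):
--                 full[h-1-y][x] = full[y][x]
--         # if square, also copy transpose of quadrants to increase symmetry (helps 8 positions)
--         if w == h:
--             for y in range(h):
--                 for x in range(w):
--                     full[x][y] = full[y][x]
--     else:
--         raise ValueError("nb_players must be 2,4 or 8")
--     return full
-- ===== SOURCE B (Python) =====
-- def mirror_map(m, nb_players):
--     # closed-form source index per output cell, one pass (no in-place mirroring passes)
--     h = len(m); w = len(m[0])
--     if nb_players == 2:
--         return [[m[y][min(x, w - 1 - x)] for x in range(w)] for y in range(h)]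
--     if nb_players == 4:
--         return [[m[min(y, h - 1 - y)][min(x, w - 1 - x)] for x in range(w)] for y in range(h)]
--     if nb_players == 8:
--         def S(r, c):
--             return m[min(r, h - 1 - r)][min(c, w - 1 - c)]
--         if w == h:
--             return [[S(min(i, j), max(i, j)) for j in range(w)] for i in range(h)]
--         return [[S(i, j) for j in range(w)] for i in range(h)]
--     raise ValueError("nb_players must be 2,4 or 8")
-- ===== Notes on version B (the rewrite author's own statement) =====
-- stated objective: simpler
-- what changed: Each output cell is computed directly from a closed-form source index (min/max folding of coordinates) in a single comprehension, replacing A's allocate-copy plus multiple in-place mirror/transpose overwrite passes.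
import Mathlib
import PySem

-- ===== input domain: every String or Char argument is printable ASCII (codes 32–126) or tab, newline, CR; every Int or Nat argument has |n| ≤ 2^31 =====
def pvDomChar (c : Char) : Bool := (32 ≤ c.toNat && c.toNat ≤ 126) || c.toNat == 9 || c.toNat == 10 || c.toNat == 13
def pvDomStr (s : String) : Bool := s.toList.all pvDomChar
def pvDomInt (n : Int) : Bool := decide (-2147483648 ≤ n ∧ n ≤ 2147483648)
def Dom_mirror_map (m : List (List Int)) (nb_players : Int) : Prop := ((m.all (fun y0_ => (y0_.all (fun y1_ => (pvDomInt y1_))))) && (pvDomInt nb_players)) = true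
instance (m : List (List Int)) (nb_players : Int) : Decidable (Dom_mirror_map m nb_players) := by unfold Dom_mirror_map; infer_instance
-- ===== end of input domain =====

-- B computes each output cell directly from a closed-form source index (min/max coordinate folding),
-- replacing A's allocate-copy plus multiple in-place mirror/transpose overwrite passes (objective: simpler).


-- ===== PORT A =====
-- grid cell read `g[i][j]`: always in range under Pre_; the default 0 only totalizes the port
def gget (g : List (List Int)) (i j : Nat) : Int := (g.getD i []).getD j 0
-- grid cell write `g[y][x] = v`
def gwrite (g : List (List Int)) (y x : Nat) (v : Int) : List (List Int) :=
  g.modify y (fun r => r.set x v)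

def mirror_map (m : List (List Int)) (nb_players : Int) : List (List Int) :=
  let h := m.length
  let w := (m.headD []).length      -- len(m[0]); m ≠ [] under Pre_
  let full0 := List.replicate h (List.replicate w (0 : Int))   -- make_empty_map(w,h,0)
  -- copy loop: full[y][x] = m[y][x]
  let full := (List.range h).foldl (fun g y =>
      (List.range w).foldl (fun g x => gwrite g y x (gget m y x)) g) full0
  if nb_players = 2 then
    (List.range h).foldl (fun g y =>
      (List.range (w/2)).foldl (fun g x => gwrite g y (w-1-x) (gget g y x)) g) full
  else if nb_players = 4 then
    let g1 := (List.range h).foldl (fun g y =>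
      (List.range (w/2)).foldl (fun g x => gwrite g y (w-1-x) (gget g y x)) g) full
    (List.range (h/2)).foldl (fun g y =>
      (List.range w).foldl (fun g x => gwrite g (h-1-y) x (gget g y x)) g) g1
  else if nb_players = 8 then
    let g1 := (List.range h).foldl (fun g y =>
      (List.range (w/2)).foldl (fun g x => gwrite g y (w-1-x) (gget g y x)) g) full
    let g2 := (List.range (h/2)).foldl (fun g y =>
      (List.range w).foldl (fun g x => gwrite g (h-1-y) x (gget g y x)) g) g1
    if w = h then
      (List.range h).foldl (fun g y =>
        (List.range w).foldl (fun g x => gwrite g x y (gget g y x)) g) g2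
    else g2
  else []  -- Python raises ValueError here; excluded by Pre_

-- ===== PORT B =====
-- S(r,c) of Source B: the 4-fold-symmetric source cell
def mirrorS (m : List (List Int)) (h w r c : Nat) : Int :=
  gget m (min r (h-1-r)) (min c (w-1-c))

def mirror_map_alt (m : List (List Int)) (nb_players : Int) : List (List Int) :=
  let h := m.length
  let w := (m.headD []).length
  if nb_players = 2 then
    (List.range h).map (fun y => (List.range w).map (fun x => gget m y (min x (w-1-x))))
  else if nb_players = 4 then
    (List.range h).map (fun y => (List.range w).map (fun x =>
      gget m (min y (h-1-y)) (min x (w-1-x))))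
  else if nb_players = 8 then
    if w = h then
      (List.range h).map (fun i => (List.range w).map (fun j => mirrorS m h w (min i j) (max i j)))
    else
      (List.range h).map (fun i => (List.range w).map (fun j => mirrorS m h w i j))
  else []  -- Python raises ValueError here; excluded by Pre_

-- ===== PRECONDITION & SPEC =====
-- Pre_ excludes exactly the inputs where A raises: empty m (IndexError on m[0]),
-- nb_players outside {2,4,8} (ValueError), and a row shorter than row 0 (IndexError on m[y][x]).
def Pre_mirror_map (m : List (List Int)) (nb_players : Int) : Prop :=
  m ≠ [] ∧ (nb_players = 2 ∨ nb_players = 4 ∨ nb_players = 8) ∧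
    ∀ r ∈ m, (m.headD []).length ≤ r.length
instance (m : List (List Int)) (nb_players : Int) : Decidable (Pre_mirror_map m nb_players) := by
  unfold Pre_mirror_map; infer_instance

def pvWitness_mirror_map : List (List Int) × Int := ([[1, 2], [3, 4]], 2)

def Spec_mirror_map (m : List (List Int)) (nb_players : Int) (out : List (List Int)) : Prop := out = mirror_map_alt m nb_players
instance (m : List (List Int)) (nb_players : Int) (out : List (List Int)) : Decidable (Spec_mirror_map m nb_players out) := by unfold Spec_mirror_map; infer_instance

-- ===== CLAIM (what is proved, stated in full; the proofs are below) =====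
def Claim_equal_mirror_map : Prop := ∀ (m : List (List Int)) (nb_players : Int), Dom_mirror_map m nb_players → Pre_mirror_map m nb_players → Spec_mirror_map m nb_players (mirror_map m nb_players)

-- ===== LEMMAS AND PROOFS =====

theorem getD_of_lt {α : Type} (l : List α) (i : Nat) (d : α) (h : i < l.length) :
    l.getD i d = l[i] := by
  simp [List.getD_eq_getElem?_getD, List.getElem?_eq_getElem h]

theorem getD_of_ge {α : Type} (l : List α) (i : Nat) (d : α) (h : l.length ≤ i) :
    l.getD i d = d := by
  simp [List.getD_eq_getElem?_getD, List.getElem?_eq_none h]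

-- shape of a grid: h rows, every row of length w
def Shape (g : List (List Int)) (h w : Nat) : Prop :=
  g.length = h ∧ ∀ i, (hi : i < g.length) → g[i].length = w

theorem shape_write {g : List (List Int)} {h w y x : Nat} {v : Int}
    (hS : Shape g h w) : Shape (gwrite g y x v) h w := by
  obtain ⟨hl, hr⟩ := hS
  refine ⟨by simp [gwrite, hl], ?_⟩
  intro i hi
  simp only [gwrite, List.length_modify] at hi
  simp only [gwrite, List.getElem_modify]
  split <;> simp [hr i hi]

-- a single in-range write, read back pointwise
theorem gget_write {g : List (List Int)} {h w y x : Nat} {v : Int}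
    (hS : Shape g h w) (hy : y < h) (hx : x < w) (i j : Nat) :
    gget (gwrite g y x v) i j = if i = y ∧ j = x then v else gget g i j := by
  obtain ⟨hl, hr⟩ := hS
  by_cases hi : i < h
  · have hi' : i < g.length := by omega
    have hig : i < (gwrite g y x v).length := by simp [gwrite]; omega
    have e1 : gget (gwrite g y x v) i j = ((gwrite g y x v)[i]'hig).getD j 0 := by
      rw [gget, getD_of_lt _ _ _ hig]
    have e2 : (gwrite g y x v)[i]'hig = if y = i then (g[i]'hi').set x v else g[i]'hi' := by
      simp [gwrite, List.getElem_modify]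
    rw [e1, e2]
    have e3 : gget g i j = (g[i]'hi').getD j 0 := by rw [gget, getD_of_lt _ _ _ hi']
    by_cases hiy : i = y
    · subst hiy
      rw [if_pos rfl]
      by_cases hjx : j = x
      · subst hjx
        rw [if_pos ⟨rfl, rfl⟩, getD_of_lt _ _ _ (by simp [hr i hi', hx]), List.getElem_set,
          if_pos rfl]
      · rw [if_neg (by tauto), e3]
        by_cases hj : j < (g[i]'hi').length
        · rw [getD_of_lt _ _ _ (by simpa using hj), getD_of_lt _ _ _ hj, List.getElem_set,
            if_neg (Ne.symm hjx)]
        · rw [getD_of_ge _ _ _ (by simp; omega), getD_of_ge _ _ _ (by omega)]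
    · rw [if_neg (Ne.symm hiy), if_neg (by tauto), e3]
  · rw [if_neg (by rintro ⟨rfl, rfl⟩; omega)]
    have o1 : (gwrite g y x v).getD i [] = [] := getD_of_ge _ _ _ (by simp [gwrite]; omega)
    have o2 : g.getD i [] = [] := getD_of_ge _ _ _ (by omega)
    rw [gget, gget, o1, o2]

theorem shape_replicate (h w : Nat) : Shape (List.replicate h (List.replicate w (0:Int))) h w := by
  refine ⟨by simp, ?_⟩
  intro i hi
  simp at hi
  simp [List.getElem_replicate]

-- ---- the copy loop ----
theorem copy_inner {g : List (List Int)} {h w y : Nat} (m : List (List Int))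
    (hS : Shape g h w) (hy : y < h) (n : Nat) (hn : n ≤ w) :
    Shape ((List.range n).foldl (fun g x => gwrite g y x (gget m y x)) g) h w ∧
    ∀ i j, gget ((List.range n).foldl (fun g x => gwrite g y x (gget m y x)) g) i j =
      if i = y ∧ j < n then gget m i j else gget g i j := by
  induction n with
  | zero => simpa using hS
  | succ k ih =>
    obtain ⟨ihS, ihv⟩ := ih (by omega)
    rw [List.range_succ, List.foldl_append, List.foldl_cons, List.foldl_nil]
    refine ⟨shape_write ihS, ?_⟩
    intro i j
    rw [gget_write ihS hy (by omega), ihv]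
    by_cases hiy : i = y
    · subst hiy
      by_cases hjk : j = k
      · subst hjk; simp
      · rw [if_neg (by tauto)]
        split_ifs <;> first | rfl | omega
    · simp [hiy]

theorem copy_outer {g : List (List Int)} {h w : Nat} (m : List (List Int))
    (hS : Shape g h w) (k : Nat) (hk : k ≤ h) :
    Shape ((List.range k).foldl (fun g y => (List.range w).foldl
        (fun g x => gwrite g y x (gget m y x)) g) g) h w ∧
    ∀ i j, gget ((List.range k).foldl (fun g y => (List.range w).foldl
        (fun g x => gwrite g y x (gget m y x)) g) g) i j =
      if i < k ∧ j < w then gget m i j else gget g i j := by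
  induction k with
  | zero => simpa using hS
  | succ t ih =>
    obtain ⟨ihS, ihv⟩ := ih (by omega)
    rw [List.range_succ, List.foldl_append, List.foldl_cons, List.foldl_nil]
    obtain ⟨jS, jv⟩ := copy_inner m ihS (show t < h by omega) w le_rfl
    refine ⟨jS, ?_⟩
    intro i j
    rw [jv, ihv]
    by_cases hit : i = t
    · subst hit
      split_ifs <;> first | rfl | omega
    · split_ifs <;> first | rfl | omega

-- ---- the left-right mirror loop: full[y][w-1-x] = full[y][x] ----
theorem lr_inner {g : List (List Int)} {h w y : Nat}
    (hS : Shape g h w) (hy : y < h) (n : Nat) (hn : n ≤ w/2) :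
    Shape ((List.range n).foldl (fun g x => gwrite g y (w-1-x) (gget g y x)) g) h w ∧
    ∀ i j, gget ((List.range n).foldl (fun g x => gwrite g y (w-1-x) (gget g y x)) g) i j =
      if i = y ∧ j < w ∧ w-1-j < n then gget g y (w-1-j) else gget g i j := by
  induction n with
  | zero =>
    refine ⟨hS, ?_⟩
    intro i j
    rw [if_neg (by omega)]
    rfl
  | succ k ih =>
    obtain ⟨ihS, ihv⟩ := ih (by omega)
    rw [List.range_succ, List.foldl_append, List.foldl_cons, List.foldl_nil]
    refine ⟨shape_write ihS, ?_⟩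
    intro i j
    rw [gget_write ihS hy (by omega), ihv, ihv]
    rw [if_neg (show ¬(y = y ∧ k < w ∧ w-1-k < k) by omega)]
    by_cases hiy : i = y
    · subst hiy
      by_cases hjk : j = w-1-k
      · subst hjk
        rw [if_pos ⟨rfl, rfl⟩, if_pos (by omega)]
        congr 1
        omega
      · rw [if_neg (by tauto)]
        split_ifs <;> first | rfl | omega
    · rw [if_neg (by tauto), if_neg (by tauto), if_neg (by tauto)]

theorem lr_outer {g : List (List Int)} {h w : Nat}
    (hS : Shape g h w) (k : Nat) (hk : k ≤ h) :
    Shape ((List.range k).foldl (fun g y => (List.range (w/2)).foldl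
        (fun g x => gwrite g y (w-1-x) (gget g y x)) g) g) h w ∧
    ∀ i j, gget ((List.range k).foldl (fun g y => (List.range (w/2)).foldl
        (fun g x => gwrite g y (w-1-x) (gget g y x)) g) g) i j =
      if i < k ∧ j < w ∧ w-1-j < w/2 then gget g i (w-1-j) else gget g i j := by
  induction k with
  | zero =>
    refine ⟨hS, ?_⟩
    intro i j
    rw [if_neg (by omega)]
    rfl
  | succ t ih =>
    obtain ⟨ihS, ihv⟩ := ih (by omega)
    rw [List.range_succ, List.foldl_append, List.foldl_cons, List.foldl_nil]
    obtain ⟨jS, jv⟩ := lr_inner ihS (show t < h by omega) (w/2) le_rfl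
    refine ⟨jS, ?_⟩
    intro i j
    rw [jv]
    simp only [ihv]
    split_ifs <;> first | rfl | omega | (congr 1 <;> omega)

-- ---- the top-bottom mirror loop: full[h-1-y][x] = full[y][x] ----
theorem tb_inner {g : List (List Int)} {h w y : Nat}
    (hS : Shape g h w) (hy : y < h/2) (n : Nat) (hn : n ≤ w) :
    Shape ((List.range n).foldl (fun g x => gwrite g (h-1-y) x (gget g y x)) g) h w ∧
    ∀ i j, gget ((List.range n).foldl (fun g x => gwrite g (h-1-y) x (gget g y x)) g) i j =
      if i = h-1-y ∧ j < n then gget g y j else gget g i j := by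
  induction n with
  | zero =>
    refine ⟨hS, ?_⟩
    intro i j
    rw [if_neg (by omega)]
    rfl
  | succ k ih =>
    obtain ⟨ihS, ihv⟩ := ih (by omega)
    rw [List.range_succ, List.foldl_append, List.foldl_cons, List.foldl_nil]
    refine ⟨shape_write ihS, ?_⟩
    intro i j
    rw [gget_write ihS (by omega) (by omega)]
    simp only [ihv]
    split_ifs <;> first | rfl | omega | (congr 1 <;> omega)

theorem tb_outer {g : List (List Int)} {h w : Nat}
    (hS : Shape g h w) (k : Nat) (hk : k ≤ h/2) :
    Shape ((List.range k).foldl (fun g y => (List.range w).foldl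
        (fun g x => gwrite g (h-1-y) x (gget g y x)) g) g) h w ∧
    ∀ i j, gget ((List.range k).foldl (fun g y => (List.range w).foldl
        (fun g x => gwrite g (h-1-y) x (gget g y x)) g) g) i j =
      if i < h ∧ h-1-i < k ∧ j < w then gget g (h-1-i) j else gget g i j := by
  induction k with
  | zero =>
    refine ⟨hS, ?_⟩
    intro i j
    rw [if_neg (by omega)]
    rfl
  | succ t ih =>
    obtain ⟨ihS, ihv⟩ := ih (by omega)
    rw [List.range_succ, List.foldl_append, List.foldl_cons, List.foldl_nil]
    obtain ⟨jS, jv⟩ := tb_inner ihS (show t < h/2 by omega) w le_rfl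
    refine ⟨jS, ?_⟩
    intro i j
    rw [jv]
    simp only [ihv]
    split_ifs <;> first | rfl | omega | (congr 1 <;> omega)

-- ---- the in-place transpose loop (square case): full[x][y] = full[y][x] ----
theorem tr_inner {g : List (List Int)} {h y : Nat}
    (hS : Shape g h h) (hy : y < h) (n : Nat) (hn : n ≤ h) :
    Shape ((List.range n).foldl (fun g x => gwrite g x y (gget g y x)) g) h h ∧
    ∀ i j, gget ((List.range n).foldl (fun g x => gwrite g x y (gget g y x)) g) i j =
      if j = y ∧ i < n then gget g y i else gget g i j := by
  induction n with
  | zero =>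
    refine ⟨hS, ?_⟩
    intro i j
    rw [if_neg (by omega)]
    rfl
  | succ k ih =>
    obtain ⟨ihS, ihv⟩ := ih (by omega)
    rw [List.range_succ, List.foldl_append, List.foldl_cons, List.foldl_nil]
    refine ⟨shape_write ihS, ?_⟩
    intro i j
    rw [gget_write ihS (by omega) (by omega)]
    simp only [ihv]
    split_ifs <;> first | rfl | omega | (congr 1 <;> omega)

theorem tr_outer {g : List (List Int)} {h : Nat}
    (hS : Shape g h h) (k : Nat) (hk : k ≤ h) :
    Shape ((List.range k).foldl (fun g y => (List.range h).foldl
        (fun g x => gwrite g x y (gget g y x)) g) g) h h ∧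
    ∀ i j, gget ((List.range k).foldl (fun g y => (List.range h).foldl
        (fun g x => gwrite g x y (gget g y x)) g) g) i j =
      if j < k ∧ i < h then gget g (min i j) (max i j) else gget g i j := by
  induction k with
  | zero =>
    refine ⟨hS, ?_⟩
    intro i j
    rw [if_neg (by omega)]
    rfl
  | succ t ih =>
    obtain ⟨ihS, ihv⟩ := ih (by omega)
    rw [List.range_succ, List.foldl_append, List.foldl_cons, List.foldl_nil]
    obtain ⟨jS, jv⟩ := tr_inner ihS (show t < h by omega) h le_rfl
    refine ⟨jS, ?_⟩
    intro i j
    rw [jv]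
    simp only [ihv]
    split_ifs <;> first | rfl | omega | (congr 1 <;> omega)

-- a grid with known pointwise values equals B's map form
theorem grid_eq_map {g : List (List Int)} {h w : Nat} {f : Nat → Nat → Int}
    (hS : Shape g h w) (hv : ∀ i j, i < h → j < w → gget g i j = f i j) :
    g = (List.range h).map (fun i => (List.range w).map (f i)) := by
  obtain ⟨hl, hr⟩ := hS
  apply List.ext_getElem
  · simp [hl]
  · intro i hi hi'
    simp only [List.length_map, List.length_range] at hi'
    rw [List.getElem_map, List.getElem_range]
    apply List.ext_getElem
    · simp [hr i hi]
    · intro j hj hj'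
      simp only [List.length_map, List.length_range] at hj'
      rw [List.getElem_map, List.getElem_range]
      have := hv i j (by omega) hj'
      rw [← this, gget, getD_of_lt _ _ _ hi, getD_of_lt _ _ _ hj]

-- the two ports agree on every input (the precondition is not even needed for the equality)
theorem mirror_map_eq_alt (m : List (List Int)) (nb : Int) :
    mirror_map m nb = mirror_map_alt m nb := by
  simp only [mirror_map, mirror_map_alt, mirrorS]
  generalize m.length = H
  generalize (m.headD []).length = W
  by_cases h2 : nb = 2
  · simp only [h2]
    obtain ⟨FS, Fv⟩ := copy_outer m (shape_replicate H W) H le_rfl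
    obtain ⟨GS, Gv⟩ := lr_outer FS H le_rfl
    apply grid_eq_map GS
    intro i j hi hj
    rw [Gv]
    simp only [Fv]
    split_ifs <;> first | omega | (congr 1 <;> omega)
  · by_cases h4 : nb = 4
    · simp only [h4]
      obtain ⟨FS, Fv⟩ := copy_outer m (shape_replicate H W) H le_rfl
      obtain ⟨G1S, G1v⟩ := lr_outer FS H le_rfl
      obtain ⟨G2S, G2v⟩ := tb_outer G1S (H/2) le_rfl
      apply grid_eq_map G2S
      intro i j hi hj
      rw [G2v]
      simp only [G1v, Fv]
      split_ifs <;> first | omega | (congr 1 <;> omega)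
    · by_cases h8 : nb = 8
      · simp only [h8]
        obtain ⟨FS, Fv⟩ := copy_outer m (shape_replicate H W) H le_rfl
        obtain ⟨G1S, G1v⟩ := lr_outer FS H le_rfl
        obtain ⟨G2S, G2v⟩ := tb_outer G1S (H/2) le_rfl
        by_cases hwh : W = H
        · subst hwh
          rw [if_pos rfl, if_pos rfl]
          obtain ⟨G3S, G3v⟩ := tr_outer G2S W le_rfl
          apply grid_eq_map G3S
          intro i j hi hj
          rw [G3v]
          simp only [G2v, G1v, Fv]
          split_ifs <;> first | omega | (congr 1 <;> omega)
        · rw [if_neg hwh, if_neg hwh]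
          apply grid_eq_map G2S
          intro i j hi hj
          rw [G2v]
          simp only [G1v, Fv]
          split_ifs <;> first | omega | (congr 1 <;> omega)
      · simp [h2, h4, h8]

-- ===== VERDICT (by name: the statement is the Claim_ definition above) =====
theorem mirror_map_spec : Claim_equal_mirror_map := by
  intro m nb _ _
  exact mirror_map_eq_alt m nb
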